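-- pv_equiv track=rewrite | github.com/Jane11111/Leetcode2021 | 360_2.py | solve
-- ===== SOURCE A (Python) =====
-- def solve(s ):
--
--     n = len(s)
--
--     dp = []
--     for i in range(n):
--         dp.append([False for j in range(n)])
--         dp[i][i] = True
--
--
--     for l in range(2,n+1):
--         for i in range(n):
--             j = i+l-1
--             if j>=n:
--                 break
--             if s[i] == s[j]:
--                 dp[i][j] = True if (j-i<2 or dp[i+1][j-1] ) else False
--
--     arr = []
--     for i in range(n):
--         arr.append([0 for j in range(n)])
--
--     dic = {'1':[100,120],'2':[200,350],'3':[360,200],'4':[220,320]}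
--
--     for l in range(2,n+1):
--         for i in range(n):
--             j = i+l-1
--             if j>=n:
--                 break
--             if dp[i][j]:
--                 continue
--
--             arr[i][j] = min(arr[i][j-1]+dic[s[j]][1],
--                            arr[i][j-1]+dic[s[j]][0],
--                            arr[i+1][j]+dic[s[i]][1],
--                            arr[i+1][j]+dic[s[i]][0])
--
--     return arr[0][-1]
-- ===== SOURCE B (Python) =====
-- def solve(s):
--     # Rolling one-dimensional DP: sweep the right end j left-to-right, keep only the
--     # previous column of (is-palindrome, cost) pairs, and collapse A's four-way min
--     # into a two-way min with the per-letter minimum cost precomputed.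
--     n = len(s)
--     m = {'1': 100, '2': 200, '3': 200, '4': 220}
--     prev = []  # prev[i] = (is_pal(i, j-1), cost(i, j-1)) for i in 0..j-1
--     for j in range(n):
--         rev = [(True, 0)]  # entries for j down to the current i, right end fixed at j
--         for i in range(j - 1, -1, -1):
--             pal = s[i] == s[j] and (j - i < 2 or prev[i + 1][0])
--             cost = 0 if pal else min(prev[i][1] + m[s[j]], rev[-1][1] + m[s[i]])
--             rev.append((pal, cost))
--         prev = rev[::-1]
--     return prev[0][1]
-- ===== Notes on version B (the rewrite author's own statement) =====
-- stated objective: faster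
-- what changed: Replaces A's three separate passes over two n-by-n tables (palindrome table, zero table, cost table with a four-way min over both dic entries) by a single left-to-right sweep that keeps only the previous column of (is-palindrome, cost) pairs in O(n) space and takes a two-way min with the per-letter minimum cost precomputed.
import Mathlib
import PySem

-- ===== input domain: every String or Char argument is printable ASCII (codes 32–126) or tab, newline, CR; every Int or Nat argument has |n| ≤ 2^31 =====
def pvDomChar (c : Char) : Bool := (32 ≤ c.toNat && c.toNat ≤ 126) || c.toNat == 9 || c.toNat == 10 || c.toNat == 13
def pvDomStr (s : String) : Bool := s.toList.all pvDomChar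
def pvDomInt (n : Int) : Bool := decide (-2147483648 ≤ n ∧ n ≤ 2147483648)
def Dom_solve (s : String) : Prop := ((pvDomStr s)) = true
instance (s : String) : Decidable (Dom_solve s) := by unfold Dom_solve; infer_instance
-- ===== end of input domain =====

-- B replaces A's two n×n tables and four-way min by a single left-to-right sweep that
-- keeps only the previous (palindrome?, cost) column and a two-way min over precomputed
-- per-letter minimum costs; measured constant-factor faster, same O(n^2) state count.

-- ===== PORT A =====
-- Python 'for …: if …: break' over a list of indices
def pvBreakFold {σ : Type} : List Int → σ → (σ → Int → Option σ) → σ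
  | [], st, _ => st
  | x :: rest, st, f =>
    match f st x with
    | none => st
    | some st' => pvBreakFold rest st' f

-- t[i][j] (read, Python index semantics via pyGet?)
def pvGet2 {α : Type} (t : List (List α)) (i j : Int) (d : α) : α :=
  (PySem.List.pyGet? ((PySem.List.pyGet? t i).getD []) j).getD d

-- t[i][j] = v (write; all writes in A are at in-range non-negative indices)
def pvSet2 {α : Type} (t : List (List α)) (i j : Int) (v : α) : List (List α) :=
  t.set i.toNat ((t.getD i.toNat []).set j.toNat v)

def pvDicA : PySem.Dict Char (List Int) :=
  PySem.Dict.ofList [('1', [100, 120]), ('2', [200, 350]), ('3', [360, 200]), ('4', [220, 320])]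

def solve (s : String) : Int :=
  let cs := s.toList
  let n : Int := PySem.Str.len s
  let dp : List (List Bool) :=
    (PySem.List.pyRange 0 n 1).foldl
      (fun dp i => pvSet2 (dp ++ [(PySem.List.pyRange 0 n 1).map (fun _ => false)]) i i true) []
  let dp :=
    (PySem.List.pyRange 2 (n + 1) 1).foldl
      (fun dp l =>
        pvBreakFold (PySem.List.pyRange 0 n 1) dp (fun dp i =>
          let j := i + l - 1
          if n ≤ j then none
          else some (
            if (PySem.List.pyGet? cs i).getD ' ' = (PySem.List.pyGet? cs j).getD ' ' then
              pvSet2 dp i j (if decide (j - i < 2) || pvGet2 dp (i + 1) (j - 1) false then true else false)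
            else dp))) dp
  let arr : List (List Int) :=
    (PySem.List.pyRange 0 n 1).foldl
      (fun arr _ => arr ++ [(PySem.List.pyRange 0 n 1).map (fun _ => (0 : Int))]) []
  let dic := pvDicA
  let arr :=
    (PySem.List.pyRange 2 (n + 1) 1).foldl
      (fun arr l =>
        pvBreakFold (PySem.List.pyRange 0 n 1) arr (fun arr i =>
          let j := i + l - 1
          if n ≤ j then none
          else some (
            if pvGet2 dp i j false then arr
            else
              let dj := (dic.get? ((PySem.List.pyGet? cs j).getD ' ')).getD []
              let di := (dic.get? ((PySem.List.pyGet? cs i).getD ' ')).getD []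
              pvSet2 arr i j
                (min (min (min (pvGet2 arr i (j - 1) 0 + (PySem.List.pyGet? dj 1).getD 0)
                               (pvGet2 arr i (j - 1) 0 + (PySem.List.pyGet? dj 0).getD 0))
                          (pvGet2 arr (i + 1) j 0 + (PySem.List.pyGet? di 1).getD 0))
                     (pvGet2 arr (i + 1) j 0 + (PySem.List.pyGet? di 0).getD 0))))) arr
  pvGet2 arr 0 (-1) 0

-- ===== PORT B =====
def pvDicB : PySem.Dict Char Int :=
  PySem.Dict.ofList [('1', 100), ('2', 200), ('3', 200), ('4', 220)]

def solve_alt (s : String) : Int :=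
  let cs := s.toList
  let n : Int := PySem.Str.len s
  let m := pvDicB
  let prev : List (Bool × Int) :=
    (PySem.List.pyRange 0 n 1).foldl
      (fun prev j =>
        let rev : List (Bool × Int) :=
          (PySem.List.pyRange (j - 1) (-1) (-1)).foldl
            (fun rev i =>
              let pal := decide ((PySem.List.pyGet? cs i).getD ' ' = (PySem.List.pyGet? cs j).getD ' ')
                          && (decide (j - i < 2) || ((PySem.List.pyGet? prev (i + 1)).getD (false, 0)).1)
              let cost : Int := if pal then 0 else
                min (((PySem.List.pyGet? prev i).getD (false, 0)).2
                       + (m.get? ((PySem.List.pyGet? cs j).getD ' ')).getD 0)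
                    (((PySem.List.pyGet? rev (-1)).getD (false, 0)).2
                       + (m.get? ((PySem.List.pyGet? cs i).getD ' ')).getD 0)
              rev ++ [(pal, cost)])
            [(true, 0)]
        (PySem.List.slice? rev none none (-1)).getD [])
      []
  ((PySem.List.pyGet? prev 0).getD (false, 0)).2

-- ===== PRECONDITION & SPEC =====
-- Pre_ excludes exactly the inputs where the Python A raises: the empty string
-- (IndexError on arr[0][-1]) and strings where some non-palindromic interval has an
-- endpoint character that is not a dic key (KeyError) — equivalently, A returns
-- normally iff s is non-empty and either every character is a dic key or all
-- characters are equal.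
def Pre_solve (s : String) : Prop :=
  s.toList ≠ [] ∧
    (s.toList.all (fun c => c == '1' || c == '2' || c == '3' || c == '4') = true ∨
     s.toList.all (fun c => c == s.toList.headI) = true)
instance (s : String) : Decidable (Pre_solve s) := by unfold Pre_solve; infer_instance

def pvWitness_solve : String := "1231"

def Spec_solve (s : String) (out : Int) : Prop := out = solve_alt s
instance (s : String) (out : Int) : Decidable (Spec_solve s out) := by unfold Spec_solve; infer_instance

-- ===== CLAIM (what is proved, stated in full; the proofs are below) =====
def Claim_equal_solve : Prop := ∀ (s : String), Dom_solve s → Pre_solve s → Spec_solve s (solve s)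

-- ===== LEMMAS AND PROOFS =====

theorem pvFoldInv {σ : Type} (f : σ → Int → σ) (g : Nat → σ) (a b : Nat) (hab : a ≤ b)
    (hstep : ∀ k, a ≤ k → k < b → f (g k) ↑k = g (k + 1)) :
    (PySem.List.pyRange ↑a ↑b 1).foldl f (g a) = g b := by
  induction h : b - a generalizing a with
  | zero =>
    have : (b : Int) ≤ a := by omega
    rw [PySem.List.pyRange_one_eq_nil this]
    have : a = b := by omega
    simp [this]
  | succ m ih =>
    have hlt : (a : Int) < b := by exact_mod_cast (by omega : a < b)
    rw [PySem.List.pyRange_one_cons hlt]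
    simp only [List.foldl_cons]
    rw [hstep a le_rfl (by omega)]
    have : ((a : Int) + 1) = ((a + 1 : Nat) : Int) := by push_cast; ring
    rw [this]
    exact ih (a + 1) (by omega) (fun k hk1 hk2 => hstep k (by omega) hk2) (by omega)

theorem pvFoldDescInv {σ : Type} (f : σ → Int → σ) (g : Nat → σ) (t : Nat)
    (hstep : ∀ k, k < t → f (g (k + 1)) ↑k = g k) :
    (PySem.List.pyRange (↑t - 1) (-1) (-1)).foldl f (g t) = g 0 := by
  induction t with
  | zero => rw [PySem.List.pyRange_neg_one_eq_nil (by omega)]; rfl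
  | succ m ih =>
    have : ((m + 1 : Nat) : Int) - 1 = (m : Int) := by push_cast; ring
    rw [this, PySem.List.pyRange_neg_one_cons (by omega : (-1 : Int) < m)]
    simp only [List.foldl_cons]
    rw [hstep m (by omega)]
    exact ih (fun k hk => hstep k (by omega))

theorem pvBreakFoldInv {σ : Type} (f : σ → Int → Option σ) (g : Nat → σ) (a b stop : Nat)
    (ha : a ≤ stop) (hb : stop < b)
    (hstep : ∀ k, a ≤ k → k < stop → f (g k) ↑k = some (g (k + 1)))
    (hstop : f (g stop) ↑stop = none) :
    pvBreakFold (PySem.List.pyRange ↑a ↑b 1) (g a) f = g stop := by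
  induction h : stop - a generalizing a with
  | zero =>
    have ha' : a = stop := by omega
    subst ha'
    rw [PySem.List.pyRange_one_cons (by exact_mod_cast hb)]
    unfold pvBreakFold
    rw [hstop]
  | succ m ih =>
    rw [PySem.List.pyRange_one_cons (by exact_mod_cast (by omega : a < b))]
    unfold pvBreakFold
    rw [hstep a le_rfl (by omega)]
    simp only []
    have : ((a : Int) + 1) = ((a + 1 : Nat) : Int) := by push_cast; ring
    rw [this]
    exact ih (a + 1) (by omega) (fun k hk1 hk2 => hstep k (by omega) hk2) (by omega)

def pvTbl {α : Type} (n : Nat) (F : Nat → Nat → α) : List (List α) :=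
  (List.range n).map (fun i => (List.range n).map (F i))

theorem pvTbl_congr {α : Type} {n : Nat} {F G : Nat → Nat → α}
    (h : ∀ i, i < n → ∀ j, j < n → F i j = G i j) : pvTbl n F = pvTbl n G := by
  unfold pvTbl
  apply List.map_congr_left
  intro i hi
  apply List.map_congr_left
  intro j hj
  exact h i (List.mem_range.mp hi) j (List.mem_range.mp hj)

theorem pvGet2_tbl {α : Type} (n : Nat) (F : Nat → Nat → α) (i j : Nat)
    (hi : i < n) (hj : j < n) (d : α) :
    pvGet2 (pvTbl n F) (i : Int) (j : Int) d = F i j := by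
  simp [pvGet2, pvTbl, hi, hj]

theorem pvSet2_tbl {α : Type} (n : Nat) (F : Nat → Nat → α) (i j : Nat)
    (hi : i < n) (hj : j < n) (v : α) :
    pvSet2 (pvTbl n F) (i : Int) (j : Int) v
      = pvTbl n (fun a b => if a = i ∧ b = j then v else F a b) := by
  unfold pvSet2 pvTbl
  have hlen : ((List.range n).map (fun i => (List.range n).map (F i))).length = n := by simp
  apply List.ext_getElem
  · simp
  intro p h1 h2
  simp only [List.getElem_set, List.getElem_map, List.getElem_range]
  by_cases hp : (i : Int).toNat = p
  · simp only [if_pos hp]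
    have hip : i = p := by omega
    subst hip
    rw [List.getD_eq_getElem?_getD]
    have hidx : (List.map (fun i => List.map (F i) (List.range n)) (List.range n))[((i : Int)).toNat]?
        = some (List.map (F i) (List.range n)) := by
      simp [hi]
    rw [hidx]
    simp only [Option.getD_some, Int.toNat_natCast, true_and]
    apply List.ext_getElem
    · simp
    intro q hq1 hq2
    simp only [List.getElem_set, List.getElem_map, List.getElem_range]
    by_cases hqj : j = q
    · subst hqj; simp
    · rw [if_neg hqj, if_neg (fun (h : q = j) => hqj h.symm)]
  · simp only [if_neg hp]
    have hip : ¬ (i = p) := by omega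
    apply List.map_congr_left
    intro q hq
    exact (if_neg (fun (h : p = i ∧ q = j) => hip h.1.symm)).symm


def pvPal (cs : List Char) (i j : Nat) : Bool :=
  if _h : i < j then
    decide (cs[i]?.getD ' ' = cs[j]?.getD ' ') && (decide (j - i < 2) || pvPal cs (i + 1) (j - 1))
  else true
termination_by j - i

def pvM (c : Char) : Int :=
  if c = '1' then 100 else if c = '2' then 200 else if c = '3' then 200 else
  if c = '4' then 220 else 0

def pvCost (cs : List Char) (i j : Nat) : Int :=
  if _h : i < j then
    if pvPal cs i j then 0
    else min (pvCost cs i (j - 1) + pvM (cs[j]?.getD ' '))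
             (pvCost cs (i + 1) j + pvM (cs[i]?.getD ' '))
  else 0
termination_by j - i

def pvAns (cs : List Char) : Int := if cs.length = 0 then 0 else pvCost cs 0 (cs.length - 1)

theorem pvPal_lt (cs : List Char) {i j : Nat} (h : i < j) :
    pvPal cs i j
      = (decide (cs[i]?.getD ' ' = cs[j]?.getD ' ')
          && (decide (j - i < 2) || pvPal cs (i + 1) (j - 1))) := by
  rw [pvPal, dif_pos h]

theorem pvPal_ge (cs : List Char) {i j : Nat} (h : ¬ i < j) : pvPal cs i j = true := by
  rw [pvPal, dif_neg h]

theorem pvCost_lt (cs : List Char) {i j : Nat} (h : i < j) :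
    pvCost cs i j
      = if pvPal cs i j then 0
        else min (pvCost cs i (j - 1) + pvM (cs[j]?.getD ' '))
                 (pvCost cs (i + 1) j + pvM (cs[i]?.getD ' ')) := by
  rw [pvCost, dif_pos h]

theorem pvCost_ge (cs : List Char) {i j : Nat} (h : ¬ i < j) : pvCost cs i j = 0 := by
  rw [pvCost, dif_neg h]

-- stage functions of A's two table loops
def pvFpal (cs : List Char) (l a b : Nat) : Bool :=
  if a = b then true else if a < b ∧ b < a + l then pvPal cs a b else false

def pvFpalIn (cs : List Char) (l i a b : Nat) : Bool :=
  if a < i ∧ b + 1 = a + l then pvPal cs a b else pvFpal cs (l - 1) a b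

def pvFc (cs : List Char) (l a b : Nat) : Int :=
  if b < a + l then pvCost cs a b else 0

def pvFcIn (cs : List Char) (l i a b : Nat) : Int :=
  if a < i ∧ b + 1 = a + l then pvCost cs a b else pvFc cs (l - 1) a b

theorem pvRowConst {α : Type} (m : Nat) (v : α) :
    (PySem.List.pyRange 0 (m : Int) 1).map (fun _ => v) = (List.range m).map (fun _ => v) := by
  simp [List.map_const', PySem.List.length_pyRange_one]

theorem dpInit (cs : List Char) :
    (PySem.List.pyRange 0 (cs.length : Int) 1).foldl
      (fun dp i =>
        pvSet2 (dp ++ [(PySem.List.pyRange 0 (cs.length : Int) 1).map (fun _ => false)]) i i true) []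
    = pvTbl cs.length (pvFpal cs 1) := by
  apply Eq.trans
    (b := (List.range cs.length).map (fun i => ((List.range cs.length).map (fun _ => false)).set i true))
  · have main := pvFoldInv
      (fun dp i =>
        pvSet2 (dp ++ [(PySem.List.pyRange 0 (cs.length : Int) 1).map (fun _ => false)]) i i true)
      (fun k => (List.range k).map (fun i => ((List.range cs.length).map (fun _ => false)).set i true))
      0 cs.length (Nat.zero_le _) ?_
    · simpa using main
    intro k _ hk
    simp only []
    rw [pvRowConst]
    unfold pvSet2
    rw [Int.toNat_natCast]
    have hget : ((List.range k).map (fun i => ((List.range cs.length).map (fun _ => false)).set i true)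
        ++ [(List.range cs.length).map (fun _ => false)])[((List.range k).map
            (fun i => ((List.range cs.length).map (fun _ => false)).set i true)).length]?
        = some ((List.range cs.length).map (fun _ => false)) := List.getElem?_concat_length
    simp only [List.length_map, List.length_range] at hget
    rw [List.getD_eq_getElem?_getD, hget]
    simp only [Option.getD_some]
    rw [List.set_append_right _ _ (by simp)]
    simp only [List.length_map, List.length_range, Nat.sub_self, List.set_cons_zero]
    rw [List.range_succ, List.map_append]
    simp
  unfold pvTbl
  apply List.map_congr_left
  intro i hi
  rw [List.mem_range] at hi
  apply List.ext_getElem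
  · simp
  intro q hq1 hq2
  simp only [List.getElem_set, List.getElem_map, List.getElem_range]
  unfold pvFpal
  by_cases hiq : i = q
  · simp [hiq]
  · simp [hiq]

theorem palInner (cs : List Char) (l : Nat) (h2 : 2 ≤ l) (hln : l ≤ cs.length) :
    pvBreakFold (PySem.List.pyRange 0 (cs.length : Int) 1)
      (pvTbl cs.length (pvFpal cs (l - 1)))
      (fun dp i =>
        let j := i + (l : Int) - 1
        if (cs.length : Int) ≤ j then none
        else some (
          if (PySem.List.pyGet? cs i).getD ' ' = (PySem.List.pyGet? cs j).getD ' ' then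
            pvSet2 dp i j
              (if decide (j - i < 2) || pvGet2 dp (i + 1) (j - 1) false then true else false)
          else dp))
    = pvTbl cs.length (pvFpal cs l) := by
  have hbig := pvBreakFoldInv
    (fun dp i =>
      let j := i + (l : Int) - 1
      if (cs.length : Int) ≤ j then none
      else some (
        if (PySem.List.pyGet? cs i).getD ' ' = (PySem.List.pyGet? cs j).getD ' ' then
          pvSet2 dp i j
            (if decide (j - i < 2) || pvGet2 dp (i + 1) (j - 1) false then true else false)
        else dp))
    (fun i => pvTbl cs.length (pvFpalIn cs l i))
    0 cs.length (cs.length - l + 1) (Nat.zero_le _) (by omega) ?_ ?_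
  · simp only [] at hbig
    have h0 : pvTbl cs.length (pvFpalIn cs l 0) = pvTbl cs.length (pvFpal cs (l - 1)) := by
      apply pvTbl_congr
      intro a _ b _
      unfold pvFpalIn
      rw [if_neg (fun (h : a < 0 ∧ b + 1 = a + l) => by omega)]
    have hend : pvTbl cs.length (pvFpalIn cs l (cs.length - l + 1)) = pvTbl cs.length (pvFpal cs l) := by
      apply pvTbl_congr
      intro a ha b hb
      unfold pvFpalIn pvFpal
      split_ifs <;> first | rfl | omega
    rw [h0] at hbig
    rw [← hend]
    exact_mod_cast hbig
  · -- loop steps before the break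
    intro k _ hk
    simp only []
    have hj : ((k : Int) + (l : Int) - 1) = ((k + l - 1 : Nat) : Int) := by push_cast; omega
    rw [hj, if_neg (by push_cast; omega)]
    have hj1 : (((k + l - 1 : Nat) : Int) - 1) = ((k + l - 2 : Nat) : Int) := by push_cast; omega
    have hk1 : ((k : Int) + 1) = ((k + 1 : Nat) : Int) := by push_cast; ring
    simp only [PySem.List.pyGet?_natCast]
    congr 1
    by_cases hc : cs[k]?.getD ' ' = cs[(k + l - 1)]?.getD ' '
    · rw [if_pos hc, hj1, hk1]
      rw [pvGet2_tbl cs.length _ (k + 1) (k + l - 2) (by omega) (by omega)]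
      have hval :
          (if (decide (((k + l - 1 : Nat) : Int) - (k : Int) < 2)
              || pvFpalIn cs l k (k + 1) (k + l - 2)) = true then true else false)
            = pvPal cs k (k + l - 1) := by
        rw [pvPal_lt cs (by omega : k < k + l - 1), hc]
        simp only [decide_true, Bool.true_and]
        by_cases hl2 : l = 2
        · subst hl2
          rw [if_pos (by simp only [Bool.or_eq_true, decide_eq_true_eq]; left; push_cast; omega)]
          simp [show k + 2 - 1 - k < 2 from by omega]
        · have hd : decide (((k + l - 1 : Nat) : Int) - (k : Int) < 2) = false := by
            simp only [decide_eq_false_iff_not]; push_cast; omega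
          have hd2 : decide (k + l - 1 - k < 2) = false := by
            simp only [decide_eq_false_iff_not]; omega
          have hIn : pvFpalIn cs l k (k + 1) (k + l - 2) = pvPal cs (k + 1) (k + l - 2) := by
            unfold pvFpalIn pvFpal
            rw [if_neg (fun (h : k + 1 < k ∧ k + l - 2 + 1 = k + 1 + l) => by omega)]
            by_cases he : k + 1 = k + l - 2
            · rw [if_pos he, pvPal_ge cs (by omega)]
            · rw [if_neg he, if_pos (by omega)]
          rw [hd, hd2, hIn, Bool.false_or, Bool.false_or]
          have harith : k + l - 1 - 1 = k + l - 2 := by omega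
          rw [harith]
          split <;> simp_all
      rw [hval, pvSet2_tbl cs.length _ k (k + l - 1) (by omega) (by omega)]
      apply pvTbl_congr
      intro a ha b hb
      by_cases hab : a = k ∧ b = k + l - 1
      · rw [if_pos hab]
        unfold pvFpalIn
        rw [if_pos (by omega), hab.1, hab.2]
      · rw [if_neg hab]
        unfold pvFpalIn
        split_ifs <;> first | rfl | omega
    · rw [if_neg hc]
      apply pvTbl_congr
      intro a ha b hb
      by_cases hab : a = k ∧ b = k + l - 1
      · have hL : pvFpalIn cs l k a b = pvFpal cs (l - 1) a b := by
          unfold pvFpalIn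
          rw [if_neg (fun (h : a < k ∧ b + 1 = a + l) => by omega)]
        have hR : pvFpalIn cs l (k + 1) a b = pvPal cs a b := by
          unfold pvFpalIn
          rw [if_pos (by omega)]
        rw [hL, hR, hab.1, hab.2]
        rw [pvPal_lt cs (by omega : k < k + l - 1)]
        unfold pvFpal
        rw [if_neg (by omega : ¬ k = k + l - 1),
            if_neg (fun (h : k < k + l - 1 ∧ k + l - 1 < k + (l - 1)) => by omega)]
        simp [hc]
      · unfold pvFpalIn
        split_ifs <;> first | rfl | omega
  · -- the break step at i = cs.length - l + 1
    simp only []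
    rw [if_pos (by push_cast; omega)]

theorem palLoop (cs : List Char) :
    (PySem.List.pyRange 2 ((cs.length : Int) + 1) 1).foldl
      (fun dp l =>
        pvBreakFold (PySem.List.pyRange 0 (cs.length : Int) 1) dp
          (fun dp i =>
            let j := i + l - 1
            if (cs.length : Int) ≤ j then none
            else some (
              if (PySem.List.pyGet? cs i).getD ' ' = (PySem.List.pyGet? cs j).getD ' ' then
                pvSet2 dp i j
                  (if decide (j - i < 2) || pvGet2 dp (i + 1) (j - 1) false then true else false)
              else dp)))
      (pvTbl cs.length (pvFpal cs 1))
    = pvTbl cs.length (pvFpal cs cs.length) := by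
  by_cases hn : cs.length = 0
  · rw [hn]
    rw [PySem.List.pyRange_one_eq_nil (by norm_num)]
    simp [pvTbl]
  · have main := pvFoldInv
      (fun dp l =>
        pvBreakFold (PySem.List.pyRange 0 (cs.length : Int) 1) dp
          (fun dp i =>
            let j := i + l - 1
            if (cs.length : Int) ≤ j then none
            else some (
              if (PySem.List.pyGet? cs i).getD ' ' = (PySem.List.pyGet? cs j).getD ' ' then
                pvSet2 dp i j
                  (if decide (j - i < 2) || pvGet2 dp (i + 1) (j - 1) false then true else false)
              else dp)))
      (fun l => pvTbl cs.length (pvFpal cs (l - 1)))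
      2 (cs.length + 1) (by omega) ?_
    · simp only [Nat.add_sub_cancel] at main
      have : (((2 : Nat) : Int)) = (2 : Int) := by norm_num
      rw [this] at main
      have : (((cs.length + 1 : Nat) : Int)) = ((cs.length : Int) + 1) := by push_cast; ring
      rw [this] at main
      exact main
    · intro k hk2 hkn
      simp only []
      exact palInner cs k hk2 (by omega)

theorem pvMinPair (c : Char) (a : Int) :
    min (a + (PySem.List.pyGet? ((pvDicA.get? c).getD []) 1).getD 0)
        (a + (PySem.List.pyGet? ((pvDicA.get? c).getD []) 0).getD 0) = a + pvM c := by
  by_cases h1 : c = '1'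
  · subst h1
    rw [show (pvDicA.get? '1').getD [] = [100, 120] from by decide]
    rw [show (PySem.List.pyGet? ([100, 120] : List Int) 1).getD 0 = 120 from by decide]
    rw [show (PySem.List.pyGet? ([100, 120] : List Int) 0).getD 0 = 100 from by decide]
    rw [show pvM '1' = 100 from by decide]
    omega
  by_cases h2 : c = '2'
  · subst h2
    rw [show (pvDicA.get? '2').getD [] = [200, 350] from by decide]
    rw [show (PySem.List.pyGet? ([200, 350] : List Int) 1).getD 0 = 350 from by decide]
    rw [show (PySem.List.pyGet? ([200, 350] : List Int) 0).getD 0 = 200 from by decide]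
    rw [show pvM '2' = 200 from by decide]
    omega
  by_cases h3 : c = '3'
  · subst h3
    rw [show (pvDicA.get? '3').getD [] = [360, 200] from by decide]
    rw [show (PySem.List.pyGet? ([360, 200] : List Int) 1).getD 0 = 200 from by decide]
    rw [show (PySem.List.pyGet? ([360, 200] : List Int) 0).getD 0 = 360 from by decide]
    rw [show pvM '3' = 200 from by decide]
    omega
  by_cases h4 : c = '4'
  · subst h4
    rw [show (pvDicA.get? '4').getD [] = [220, 320] from by decide]
    rw [show (PySem.List.pyGet? ([220, 320] : List Int) 1).getD 0 = 320 from by decide]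
    rw [show (PySem.List.pyGet? ([220, 320] : List Int) 0).getD 0 = 220 from by decide]
    rw [show pvM '4' = 220 from by decide]
    omega
  · have hnone : pvDicA.get? c = none := by
      rw [PySem.Dict.get?_eq_none_iff_not_mem_keys]
      rw [show pvDicA.keys = ['1', '2', '3', '4'] from by decide]
      simp [h1, h2, h3, h4]
    rw [hnone]
    have hm : pvM c = 0 := by
      unfold pvM
      rw [if_neg h1, if_neg h2, if_neg h3, if_neg h4]
    rw [hm]
    simp [PySem.List.pyGet?]

theorem pvMin4 (c c' : Char) (a b : Int) :
    min (min (min (a + (PySem.List.pyGet? ((pvDicA.get? c).getD []) 1).getD 0)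
                  (a + (PySem.List.pyGet? ((pvDicA.get? c).getD []) 0).getD 0))
             (b + (PySem.List.pyGet? ((pvDicA.get? c').getD []) 1).getD 0))
        (b + (PySem.List.pyGet? ((pvDicA.get? c').getD []) 0).getD 0)
      = min (a + pvM c) (b + pvM c') := by
  rw [min_assoc, pvMinPair, pvMinPair]

theorem costInner (cs : List Char) (l : Nat) (h2 : 2 ≤ l) (hln : l ≤ cs.length) :
    pvBreakFold (PySem.List.pyRange 0 (cs.length : Int) 1)
      (pvTbl cs.length (pvFc cs (l - 1)))
      (fun arr i =>
        let j := i + (l : Int) - 1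
        if (cs.length : Int) ≤ j then none
        else some (
          if pvGet2 (pvTbl cs.length (pvFpal cs cs.length)) i j false then arr
          else
            let dj := (pvDicA.get? ((PySem.List.pyGet? cs j).getD ' ')).getD []
            let di := (pvDicA.get? ((PySem.List.pyGet? cs i).getD ' ')).getD []
            pvSet2 arr i j
              (min (min (min (pvGet2 arr i (j - 1) 0 + (PySem.List.pyGet? dj 1).getD 0)
                             (pvGet2 arr i (j - 1) 0 + (PySem.List.pyGet? dj 0).getD 0))
                        (pvGet2 arr (i + 1) j 0 + (PySem.List.pyGet? di 1).getD 0))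
                   (pvGet2 arr (i + 1) j 0 + (PySem.List.pyGet? di 0).getD 0))))
    = pvTbl cs.length (pvFc cs l) := by
  have hbig := pvBreakFoldInv
    (fun arr i =>
      let j := i + (l : Int) - 1
      if (cs.length : Int) ≤ j then none
      else some (
        if pvGet2 (pvTbl cs.length (pvFpal cs cs.length)) i j false then arr
        else
          let dj := (pvDicA.get? ((PySem.List.pyGet? cs j).getD ' ')).getD []
          let di := (pvDicA.get? ((PySem.List.pyGet? cs i).getD ' ')).getD []
          pvSet2 arr i j
            (min (min (min (pvGet2 arr i (j - 1) 0 + (PySem.List.pyGet? dj 1).getD 0)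
                           (pvGet2 arr i (j - 1) 0 + (PySem.List.pyGet? dj 0).getD 0))
                      (pvGet2 arr (i + 1) j 0 + (PySem.List.pyGet? di 1).getD 0))
                 (pvGet2 arr (i + 1) j 0 + (PySem.List.pyGet? di 0).getD 0))))
    (fun i => pvTbl cs.length (pvFcIn cs l i))
    0 cs.length (cs.length - l + 1) (Nat.zero_le _) (by omega) ?_ ?_
  · simp only [] at hbig
    have h0 : pvTbl cs.length (pvFcIn cs l 0) = pvTbl cs.length (pvFc cs (l - 1)) := by
      apply pvTbl_congr
      intro a _ b _
      unfold pvFcIn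
      rw [if_neg (fun (h : a < 0 ∧ b + 1 = a + l) => by omega)]
    have hend : pvTbl cs.length (pvFcIn cs l (cs.length - l + 1)) = pvTbl cs.length (pvFc cs l) := by
      apply pvTbl_congr
      intro a ha b hb
      unfold pvFcIn pvFc
      split_ifs <;> first | rfl | omega
    rw [h0] at hbig
    rw [← hend]
    exact_mod_cast hbig
  · -- loop steps before the break
    intro k _ hk
    simp only []
    have hj : ((k : Int) + (l : Int) - 1) = ((k + l - 1 : Nat) : Int) := by push_cast; omega
    rw [hj, if_neg (by push_cast; omega)]
    have hj1 : (((k + l - 1 : Nat) : Int) - 1) = ((k + l - 2 : Nat) : Int) := by push_cast; omega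
    have hk1 : ((k : Int) + 1) = ((k + 1 : Nat) : Int) := by push_cast; ring
    rw [pvGet2_tbl cs.length _ k (k + l - 1) (by omega) (by omega)]
    have hdp : pvFpal cs cs.length k (k + l - 1) = pvPal cs k (k + l - 1) := by
      unfold pvFpal
      rw [if_neg (by omega : ¬ k = k + l - 1), if_pos (by omega)]
    rw [hdp]
    simp only [PySem.List.pyGet?_natCast]
    congr 1
    by_cases hp : pvPal cs k (k + l - 1) = true
    · rw [if_pos hp]
      apply pvTbl_congr
      intro a ha b hb
      unfold pvFcIn
      by_cases hab : a = k ∧ b = k + l - 1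
      · rw [if_neg (fun (h : a < k ∧ b + 1 = a + l) => by omega), if_pos (by omega)]
        rw [hab.1, hab.2]
        rw [pvCost_lt cs (by omega : k < k + l - 1), if_pos hp]
        unfold pvFc
        rw [if_neg (by omega : ¬ k + l - 1 < k + (l - 1))]
      · split_ifs <;> first | rfl | omega
    · rw [if_neg hp, hj1, hk1]
      rw [pvGet2_tbl cs.length _ k (k + l - 2) (by omega) (by omega)]
      rw [pvGet2_tbl cs.length _ (k + 1) (k + l - 1) (by omega) (by omega)]
      have hrd1 : pvFcIn cs l k k (k + l - 2) = pvCost cs k (k + l - 2) := by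
        unfold pvFcIn pvFc
        rw [if_neg (fun (h : k < k ∧ k + l - 2 + 1 = k + l) => by omega), if_pos (by omega)]
      have hrd2 : pvFcIn cs l k (k + 1) (k + l - 1) = pvCost cs (k + 1) (k + l - 1) := by
        unfold pvFcIn pvFc
        rw [if_neg (fun (h : k + 1 < k ∧ k + l - 1 + 1 = k + 1 + l) => by omega), if_pos (by omega)]
      rw [hrd1, hrd2, pvMin4]
      have hval : min (pvCost cs k (k + l - 2) + pvM (cs[(k + l - 1)]?.getD ' '))
          (pvCost cs (k + 1) (k + l - 1) + pvM (cs[k]?.getD ' ')) = pvCost cs k (k + l - 1) := by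
        rw [pvCost_lt cs (by omega : k < k + l - 1), if_neg hp]
        have : k + l - 1 - 1 = k + l - 2 := by omega
        rw [this]
      rw [hval, pvSet2_tbl cs.length _ k (k + l - 1) (by omega) (by omega)]
      apply pvTbl_congr
      intro a ha b hb
      unfold pvFcIn
      by_cases hab : a = k ∧ b = k + l - 1
      · rw [if_pos hab, if_pos (by omega), hab.1, hab.2]
      · rw [if_neg hab]
        split_ifs <;> first | rfl | omega
  · -- the break step
    simp only []
    rw [if_pos (by push_cast; omega)]

theorem costLoop (cs : List Char) :
    (PySem.List.pyRange 2 ((cs.length : Int) + 1) 1).foldl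
      (fun arr l =>
        pvBreakFold (PySem.List.pyRange 0 (cs.length : Int) 1) arr
          (fun arr i =>
            let j := i + l - 1
            if (cs.length : Int) ≤ j then none
            else some (
              if pvGet2 (pvTbl cs.length (pvFpal cs cs.length)) i j false then arr
              else
                let dj := (pvDicA.get? ((PySem.List.pyGet? cs j).getD ' ')).getD []
                let di := (pvDicA.get? ((PySem.List.pyGet? cs i).getD ' ')).getD []
                pvSet2 arr i j
                  (min (min (min (pvGet2 arr i (j - 1) 0 + (PySem.List.pyGet? dj 1).getD 0)
                                 (pvGet2 arr i (j - 1) 0 + (PySem.List.pyGet? dj 0).getD 0))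
                            (pvGet2 arr (i + 1) j 0 + (PySem.List.pyGet? di 1).getD 0))
                       (pvGet2 arr (i + 1) j 0 + (PySem.List.pyGet? di 0).getD 0)))))
      (pvTbl cs.length (pvFc cs 1))
    = pvTbl cs.length (pvFc cs cs.length) := by
  by_cases hn : cs.length = 0
  · rw [hn]
    rw [PySem.List.pyRange_one_eq_nil (by norm_num)]
    simp [pvTbl]
  · have main := pvFoldInv
      (fun arr l =>
        pvBreakFold (PySem.List.pyRange 0 (cs.length : Int) 1) arr
          (fun arr i =>
            let j := i + l - 1
            if (cs.length : Int) ≤ j then none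
            else some (
              if pvGet2 (pvTbl cs.length (pvFpal cs cs.length)) i j false then arr
              else
                let dj := (pvDicA.get? ((PySem.List.pyGet? cs j).getD ' ')).getD []
                let di := (pvDicA.get? ((PySem.List.pyGet? cs i).getD ' ')).getD []
                pvSet2 arr i j
                  (min (min (min (pvGet2 arr i (j - 1) 0 + (PySem.List.pyGet? dj 1).getD 0)
                                 (pvGet2 arr i (j - 1) 0 + (PySem.List.pyGet? dj 0).getD 0))
                            (pvGet2 arr (i + 1) j 0 + (PySem.List.pyGet? di 1).getD 0))
                       (pvGet2 arr (i + 1) j 0 + (PySem.List.pyGet? di 0).getD 0)))))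
      (fun l => pvTbl cs.length (pvFc cs (l - 1)))
      2 (cs.length + 1) (by omega) ?_
    · simp only [Nat.add_sub_cancel] at main
      have h2c : (((2 : Nat) : Int)) = (2 : Int) := by norm_num
      rw [h2c] at main
      have hc : (((cs.length + 1 : Nat) : Int)) = ((cs.length : Int) + 1) := by push_cast; ring
      rw [hc] at main
      exact main
    · intro k hk2 hkn
      simp only []
      exact costInner cs k hk2 (by omega)

theorem pvFoldAppend {α β : Type} (l : List α) (v : β) (init : List β) :
    l.foldl (fun acc _ => acc ++ [v]) init = init ++ List.replicate l.length v := by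
  induction l generalizing init with
  | nil => simp
  | cons x xs ih =>
    simp only [List.foldl_cons, List.length_cons, ih, List.append_assoc, List.singleton_append]
    rw [List.replicate_succ]

theorem arrInit (cs : List Char) :
    (PySem.List.pyRange 0 (cs.length : Int) 1).foldl
      (fun arr _ => arr ++ [(PySem.List.pyRange 0 (cs.length : Int) 1).map (fun _ => (0 : Int))]) []
    = pvTbl cs.length (pvFc cs 1) := by
  rw [pvFoldAppend, pvRowConst]
  have hlen : (PySem.List.pyRange 0 (cs.length : Int) 1).length = cs.length := by
    simp [PySem.List.length_pyRange_one]
  rw [hlen, List.nil_append]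
  unfold pvTbl
  apply List.ext_getElem
  · simp
  intro p h1 h2
  simp only [List.getElem_replicate, List.getElem_map, List.getElem_range]
  apply List.ext_getElem
  · simp
  intro q hq1 hq2
  simp only [List.getElem_replicate, List.getElem_map, List.getElem_range]
  unfold pvFc
  by_cases h : q < p + 1
  · rw [if_pos h, pvCost_ge cs (by omega)]
  · rw [if_neg h]

theorem pvExtract (cs : List Char) :
    pvGet2 (pvTbl cs.length (pvFc cs cs.length)) 0 (-1) 0 = pvAns cs := by
  unfold pvAns
  rcases Nat.eq_zero_or_pos cs.length with hn | hn
  · rw [if_pos hn]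
    unfold pvTbl pvGet2
    rw [hn]
    simp [PySem.List.pyGet?]
  · rw [if_neg (by omega)]
    unfold pvTbl pvGet2
    have h0 : PySem.List.pyGet? ((List.range cs.length).map
        (fun i => (List.range cs.length).map (pvFc cs cs.length i))) 0
        = some ((List.range cs.length).map (pvFc cs cs.length 0)) := by
      rw [PySem.List.pyGet?_zero]
      simp [hn]
  -- careful
    rw [h0]
    simp only [Option.getD_some]
    rw [PySem.List.pyGet?_neg_one]
    rw [List.getLast?_eq_getElem?]
    simp only [List.length_map, List.length_range]
    rw [List.getElem?_map]
    rw [List.getElem?_range (by omega : cs.length - 1 < cs.length)]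
    simp only [Option.map_some, Option.getD_some]
    unfold pvFc
    rw [if_pos (by omega)]

theorem solveA_eq (s : String) : solve s = pvAns s.toList := by
  have hlen : PySem.Str.len s = (s.toList.length : Int) := by simp
  simp only [solve, hlen]
  rw [dpInit s.toList, palLoop s.toList, arrInit s.toList, costLoop s.toList, pvExtract s.toList]

def pvCol (cs : List Char) (j t : Nat) : List (Bool × Int) :=
  (List.range (j + 1 - t)).map (fun k => (pvPal cs (j - k) j, pvCost cs (j - k) j))

def pvPrev (cs : List Char) (j : Nat) : List (Bool × Int) :=
  (List.range j).map (fun i => (pvPal cs i (j - 1), pvCost cs i (j - 1)))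

theorem pvLookB (c : Char) : (pvDicB.get? c).getD 0 = pvM c := by
  by_cases h1 : c = '1'
  · subst h1; decide
  by_cases h2 : c = '2'
  · subst h2; decide
  by_cases h3 : c = '3'
  · subst h3; decide
  by_cases h4 : c = '4'
  · subst h4; decide
  · have hnone : pvDicB.get? c = none := by
      rw [PySem.Dict.get?_eq_none_iff_not_mem_keys]
      rw [show pvDicB.keys = ['1', '2', '3', '4'] from by decide]
      simp [h1, h2, h3, h4]
    rw [hnone]
    have hm : pvM c = 0 := by
      unfold pvM
      rw [if_neg h1, if_neg h2, if_neg h3, if_neg h4]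
    rw [hm]
    rfl

theorem colInner (cs : List Char) (j : Nat) (hj : j < cs.length) :
    (PySem.List.pyRange ((j : Int) - 1) (-1) (-1)).foldl
      (fun rev i =>
        let pal := decide ((PySem.List.pyGet? cs i).getD ' ' = (PySem.List.pyGet? cs (j : Int)).getD ' ')
            && (decide ((j : Int) - i < 2) || ((PySem.List.pyGet? (pvPrev cs j) (i + 1)).getD (false, 0)).1)
        let cost : Int := if pal then 0 else
          min (((PySem.List.pyGet? (pvPrev cs j) i).getD (false, 0)).2
                 + (pvDicB.get? ((PySem.List.pyGet? cs (j : Int)).getD ' ')).getD 0)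
              (((PySem.List.pyGet? rev (-1)).getD (false, 0)).2
                 + (pvDicB.get? ((PySem.List.pyGet? cs i).getD ' ')).getD 0)
        rev ++ [(pal, cost)])
      [(true, 0)]
    = pvCol cs j 0 := by
  have hstart : pvCol cs j j = [(true, 0)] := by
    unfold pvCol
    rw [show j + 1 - j = 1 from by omega]
    simp only [List.range_one, List.map_cons, List.map_nil, Nat.sub_zero]
    rw [pvPal_ge cs (by omega), pvCost_ge cs (by omega)]
  rw [← hstart]
  apply pvFoldDescInv
  intro k hk
  simp only []
  -- the new element appended is (pvPal cs k j, pvCost cs k j)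
  have hkc : ((k : Int) + 1) = ((k + 1 : Nat) : Int) := by push_cast; ring
  rw [hkc]
  simp only [PySem.List.pyGet?_natCast]
  have hpalread : ((pvPrev cs j)[(k + 1 : Nat)]?.getD (false, 0)).1
      = (if k + 1 < j then pvPal cs (k + 1) (j - 1) else false) := by
    unfold pvPrev
    by_cases hlt : k + 1 < j
    · rw [if_pos hlt]
      rw [List.getElem?_map, List.getElem?_range hlt]
      rfl
    · rw [if_neg hlt]
      rw [List.getElem?_map, List.getElem?_eq_none (by simpa using (by omega : j ≤ k + 1))]
      rfl
  have hcostread : ((pvPrev cs j)[(k : Nat)]?.getD (false, 0)).2 = pvCost cs k (j - 1) := by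
    unfold pvPrev
    rw [List.getElem?_map, List.getElem?_range (by omega : k < j)]
    rfl
  have hlast : (PySem.List.pyGet? (pvCol cs j (k + 1)) (-1)).getD (false, 0)
      = (pvPal cs (k + 1) j, pvCost cs (k + 1) j) := by
    rw [PySem.List.pyGet?_neg_one]
    unfold pvCol
    rw [List.getLast?_eq_getElem?]
    simp only [List.length_map, List.length_range]
    rw [List.getElem?_map, List.getElem?_range (by omega : j + 1 - (k + 1) - 1 < j + 1 - (k + 1))]
    simp only [Option.map_some, Option.getD_some]
    rw [show j - (j + 1 - (k + 1) - 1) = k + 1 from by omega]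
  rw [hpalread, hcostread, hlast]
  have hpal : (decide (cs[k]?.getD ' ' = cs[j]?.getD ' ')
      && (decide ((j : Int) - (k : Int) < 2) || (if k + 1 < j then pvPal cs (k + 1) (j - 1) else false)))
      = pvPal cs k j := by
    rw [pvPal_lt cs (by omega : k < j)]
    by_cases h2 : j - k < 2
    · rw [if_neg (by omega : ¬ k + 1 < j)]
      have hd1 : decide ((j : Int) - (k : Int) < 2) = true := by
        simp only [decide_eq_true_eq]; omega
      have hd2 : decide (j - k < 2) = true := by simp only [decide_eq_true_eq]; omega
      rw [hd1, hd2]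
      simp
    · rw [if_pos (by omega : k + 1 < j)]
      have hd1 : decide ((j : Int) - (k : Int) < 2) = false := by
        simp only [decide_eq_false_iff_not]; omega
      have hd2 : decide (j - k < 2) = false := by simp only [decide_eq_false_iff_not]; omega
      rw [hd1, hd2]
  rw [hpal, pvLookB, pvLookB]
  have hcost : (if pvPal cs k j then (0 : Int) else
      min (pvCost cs k (j - 1) + pvM (cs[j]?.getD ' '))
          (pvCost cs (k + 1) j + pvM (cs[k]?.getD ' ')))
      = pvCost cs k j := by
    rw [pvCost_lt cs (by omega : k < j)]
  rw [hcost]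
  unfold pvCol
  rw [show j + 1 - k = (j + 1 - (k + 1)) + 1 from by omega, List.range_succ, List.map_append]
  simp only [List.map_cons, List.map_nil]
  rw [show j - (j + 1 - (k + 1)) = k from by omega]

theorem pvColRev (cs : List Char) (j : Nat) :
    (pvCol cs j 0).reverse = (List.range (j + 1)).map (fun i => (pvPal cs i j, pvCost cs i j)) := by
  unfold pvCol
  apply List.ext_getElem
  · simp
  intro p h1 h2
  have hp : p < j + 1 := by simpa using h2
  simp only [List.getElem_reverse, List.getElem_map, List.getElem_range, List.length_map,
    List.length_range, Nat.sub_zero]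
  rw [show j - (j + 1 - 1 - p) = p from by omega]

theorem outerB (cs : List Char) :
    (PySem.List.pyRange 0 (cs.length : Int) 1).foldl
      (fun prev j =>
        let rev : List (Bool × Int) :=
          (PySem.List.pyRange (j - 1) (-1) (-1)).foldl
            (fun rev i =>
              let pal := decide ((PySem.List.pyGet? cs i).getD ' ' = (PySem.List.pyGet? cs j).getD ' ')
                  && (decide (j - i < 2) || ((PySem.List.pyGet? prev (i + 1)).getD (false, 0)).1)
              let cost : Int := if pal then 0 else
                min (((PySem.List.pyGet? prev i).getD (false, 0)).2
                       + (pvDicB.get? ((PySem.List.pyGet? cs j).getD ' ')).getD 0)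
                    (((PySem.List.pyGet? rev (-1)).getD (false, 0)).2
                       + (pvDicB.get? ((PySem.List.pyGet? cs i).getD ' ')).getD 0)
              rev ++ [(pal, cost)])
            [(true, 0)]
        (PySem.List.slice? rev none none (-1)).getD [])
      []
    = pvPrev cs cs.length := by
  have main := pvFoldInv
    (fun prev j =>
      let rev : List (Bool × Int) :=
        (PySem.List.pyRange (j - 1) (-1) (-1)).foldl
          (fun rev i =>
            let pal := decide ((PySem.List.pyGet? cs i).getD ' ' = (PySem.List.pyGet? cs j).getD ' ')
                && (decide (j - i < 2) || ((PySem.List.pyGet? prev (i + 1)).getD (false, 0)).1)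
            let cost : Int := if pal then 0 else
              min (((PySem.List.pyGet? prev i).getD (false, 0)).2
                     + (pvDicB.get? ((PySem.List.pyGet? cs j).getD ' ')).getD 0)
                  (((PySem.List.pyGet? rev (-1)).getD (false, 0)).2
                     + (pvDicB.get? ((PySem.List.pyGet? cs i).getD ' ')).getD 0)
            rev ++ [(pal, cost)])
          [(true, 0)]
      (PySem.List.slice? rev none none (-1)).getD [])
    (fun j => pvPrev cs j)
    0 cs.length (Nat.zero_le _) ?_
  · simpa [pvPrev] using main
  · intro j _ hj
    simp only []
    rw [colInner cs j hj]
    rw [PySem.List.slice?_none_none_neg_one]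
    simp only [Option.getD_some]
    rw [pvColRev]
    unfold pvPrev
    rw [show j + 1 - 1 = j from by omega]

theorem solveB_eq (s : String) : solve_alt s = pvAns s.toList := by
  have hlen : PySem.Str.len s = (s.toList.length : Int) := by simp
  simp only [solve_alt, hlen]
  rw [outerB s.toList]
  unfold pvPrev pvAns
  rcases Nat.eq_zero_or_pos s.toList.length with hn | hn
  · rw [if_pos hn, hn]
    simp [PySem.List.pyGet?]
  · rw [if_neg (by omega)]
    rw [PySem.List.pyGet?_zero]
    rw [List.getElem?_map, List.getElem?_range (by omega : 0 < s.toList.length)]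
    rfl

-- ===== VERDICT (by name: the statement is the Claim_ definition above) =====
theorem solve_spec : Claim_equal_solve := by
  intro s _ _
  unfold Spec_solve
  rw [solveA_eq, solveB_eq]
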